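-- pv_equiv track=rewrite | github.com/sincerelyyyash/gitbot | app/services/pr_analysis_service.py | _determine_review_priority
-- ===== SOURCE A (Python) =====
-- from typing import List, Dict, Any, Optional, Tuple, Set
--
-- def _determine_review_priority(
--
--     security_issues: List[Dict],
--     quality_issues: List[Dict],
--     complexity_issues: List[Dict],
--     potential_bugs: List[Dict]
-- ) -> str:
--     """Determine review priority based on issues found."""
--
--     # Critical priority for security issues
--     if any(issue.get("severity") == "critical" for issue in security_issues):
--         return "critical"
--
--     # Critical priority for critical bugs
--     if any(issue.get("severity") == "critical" for issue in potential_bugs):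
--         return "critical"
--
--     # High priority for high severity issues
--     high_severity_count = sum([
--         len([i for i in security_issues if i.get("severity") == "high"]),
--         len([i for i in potential_bugs if i.get("severity") == "high"]),
--         len([i for i in complexity_issues if i.get("severity") == "high"])
--     ])
--
--     if high_severity_count > 0:
--         return "high"
--
--     # Medium priority for multiple medium issues
--     medium_severity_count = sum([
--         len([i for i in security_issues if i.get("severity") == "medium"]),
--         len([i for i in quality_issues if i.get("severity") == "medium"]),
--         len([i for i in complexity_issues if i.get("severity") == "medium"]),
--         len([i for i in potential_bugs if i.get("severity") == "medium"])
--     ])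
--
--     if medium_severity_count > 3:
--         return "high"
--     elif medium_severity_count > 1:
--         return "medium"
--
--     # Low priority for minor issues only
--     total_issues = len(security_issues) + len(quality_issues) + len(complexity_issues) + len(potential_bugs)
--     if total_issues > 0:
--         return "low"
--
--     return "low"
-- ===== SOURCE B (Python) =====
-- def _determine_review_priority(
--     security_issues,
--     quality_issues,
--     complexity_issues,
--     potential_bugs,
-- ):
--     """Determine review priority: one tallying pass per list, then one threshold cascade."""
--     crit = high = med = 0
--     for counts_crit, counts_high, issues in (
--         (True, True, security_issues),
--         (False, False, quality_issues),
--         (False, True, complexity_issues),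
--         (True, True, potential_bugs),
--     ):
--         for issue in issues:
--             sev = issue.get("severity")
--             if sev == "critical" and counts_crit:
--                 crit += 1
--             elif sev == "high" and counts_high:
--                 high += 1
--             elif sev == "medium":
--                 med += 1
--     if crit:
--         return "critical"
--     if high:
--         return "high"
--     if med > 3:
--         return "high"
--     if med > 1:
--         return "medium"
--     return "low"
-- ===== Notes on version B (the rewrite author's own statement) =====
-- stated objective: simpler
-- what changed: Replaces A's seven any()/comprehension re-scans of the four lists with a single tallying loop that counts critical/high/medium per category flags in one pass, followed by one threshold cascade.
import Mathlib
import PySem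

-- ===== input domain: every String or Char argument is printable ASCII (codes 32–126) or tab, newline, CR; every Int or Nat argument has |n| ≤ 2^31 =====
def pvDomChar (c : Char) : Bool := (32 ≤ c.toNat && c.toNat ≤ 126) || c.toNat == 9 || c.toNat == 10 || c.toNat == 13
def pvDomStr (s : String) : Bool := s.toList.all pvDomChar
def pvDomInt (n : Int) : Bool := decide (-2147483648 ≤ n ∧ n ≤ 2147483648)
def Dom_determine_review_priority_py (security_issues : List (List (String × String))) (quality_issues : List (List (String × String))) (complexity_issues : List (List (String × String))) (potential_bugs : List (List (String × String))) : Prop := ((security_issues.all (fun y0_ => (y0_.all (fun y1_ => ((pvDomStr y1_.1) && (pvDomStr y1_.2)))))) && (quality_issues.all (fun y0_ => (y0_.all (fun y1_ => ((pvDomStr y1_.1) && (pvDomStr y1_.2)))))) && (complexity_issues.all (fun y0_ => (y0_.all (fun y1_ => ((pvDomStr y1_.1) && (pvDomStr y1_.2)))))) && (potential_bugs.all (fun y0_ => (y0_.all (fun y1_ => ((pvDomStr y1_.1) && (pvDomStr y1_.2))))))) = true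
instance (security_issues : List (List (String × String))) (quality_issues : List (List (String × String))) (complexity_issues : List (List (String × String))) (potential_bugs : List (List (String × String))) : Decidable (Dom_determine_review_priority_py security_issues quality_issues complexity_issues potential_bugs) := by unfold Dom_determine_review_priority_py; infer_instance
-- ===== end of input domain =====

-- B replaces A's seven any()/comprehension re-scans with one tallying pass per list plus one threshold cascade (simpler).
-- Shared primitive: Python's dict.get(k) on an association list (first match).
def pyDictGet (issue : List (String × String)) (k : String) : Option String :=
  (issue.find? (fun kv => kv.1 == k)).map (·.2)

-- ===== PORT A =====
def determine_review_priority_py (security_issues : List (List (String × String))) (quality_issues : List (List (String × String))) (complexity_issues : List (List (String × String))) (potential_bugs : List (List (String × String))) : String :=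
  if security_issues.any (fun issue => pyDictGet issue "severity" == some "critical") then "critical"
  else if potential_bugs.any (fun issue => pyDictGet issue "severity" == some "critical") then "critical"
  else
    let high_severity_count : Int :=
      ((security_issues.filter (fun i => pyDictGet i "severity" == some "high")).length : Int) +
      ((potential_bugs.filter (fun i => pyDictGet i "severity" == some "high")).length : Int) +
      ((complexity_issues.filter (fun i => pyDictGet i "severity" == some "high")).length : Int)
    if high_severity_count > 0 then "high"
    else
      let medium_severity_count : Int :=
        ((security_issues.filter (fun i => pyDictGet i "severity" == some "medium")).length : Int) +
        ((quality_issues.filter (fun i => pyDictGet i "severity" == some "medium")).length : Int) +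
        ((complexity_issues.filter (fun i => pyDictGet i "severity" == some "medium")).length : Int) +
        ((potential_bugs.filter (fun i => pyDictGet i "severity" == some "medium")).length : Int)
      if medium_severity_count > 3 then "high"
      else if medium_severity_count > 1 then "medium"
      else
        let total_issues : Int :=
          (security_issues.length : Int) + (quality_issues.length : Int) +
          (complexity_issues.length : Int) + (potential_bugs.length : Int)
        if total_issues > 0 then "low" else "low"

-- ===== PORT B =====
-- inner loop body of Source B: classify one issue into the (crit, high, med) tallies
def bTally (counts_crit counts_high : Bool) (acc : Int × Int × Int) (issue : List (String × String)) : Int × Int × Int :=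
  let sev := pyDictGet issue "severity"
  if sev == some "critical" && counts_crit then (acc.1 + 1, acc.2.1, acc.2.2)
  else if sev == some "high" && counts_high then (acc.1, acc.2.1 + 1, acc.2.2)
  else if sev == some "medium" then (acc.1, acc.2.1, acc.2.2 + 1)
  else acc

def determine_review_priority_py_alt (security_issues : List (List (String × String))) (quality_issues : List (List (String × String))) (complexity_issues : List (List (String × String))) (potential_bugs : List (List (String × String))) : String :=
  let acc := [(true, true, security_issues), (false, false, quality_issues),
              (false, true, complexity_issues), (true, true, potential_bugs)].foldl
    (fun acc cat => cat.2.2.foldl (bTally cat.1 cat.2.1) acc) ((0 : Int), (0 : Int), (0 : Int))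
  if acc.1 ≠ 0 then "critical"
  else if acc.2.1 ≠ 0 then "high"
  else if acc.2.2 > 3 then "high"
  else if acc.2.2 > 1 then "medium"
  else "low"

-- ===== PRECONDITION & SPEC =====
def Spec_determine_review_priority_py (security_issues : List (List (String × String))) (quality_issues : List (List (String × String))) (complexity_issues : List (List (String × String))) (potential_bugs : List (List (String × String))) (out : String) : Prop := out = determine_review_priority_py_alt security_issues quality_issues complexity_issues potential_bugs
instance (security_issues : List (List (String × String))) (quality_issues : List (List (String × String))) (complexity_issues : List (List (String × String))) (potential_bugs : List (List (String × String))) (out : String) : Decidable (Spec_determine_review_priority_py security_issues quality_issues complexity_issues potential_bugs out) := by unfold Spec_determine_review_priority_py; infer_instance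

-- ===== CLAIM =====
def Claim_equal_determine_review_priority_py : Prop := ∀ (security_issues : List (List (String × String))) (quality_issues : List (List (String × String))) (complexity_issues : List (List (String × String))) (potential_bugs : List (List (String × String))), Dom_determine_review_priority_py security_issues quality_issues complexity_issues potential_bugs → Spec_determine_review_priority_py security_issues quality_issues complexity_issues potential_bugs (determine_review_priority_py security_issues quality_issues complexity_issues potential_bugs)

-- ===== LEMMAS AND PROOFS =====
-- B's inner fold over one list adds the per-severity counts to the accumulator
theorem bTally_foldl (cc ch : Bool) (xs : List (List (String × String))) (c h m : Int) :
    xs.foldl (bTally cc ch) (c, h, m) =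
      (c + (if cc then ((xs.countP (fun i => pyDictGet i "severity" == some "critical")) : Int) else 0),
       h + (if ch then ((xs.countP (fun i => pyDictGet i "severity" == some "high")) : Int) else 0),
       m + ((xs.countP (fun i => pyDictGet i "severity" == some "medium")) : Int)) := by
  induction xs generalizing c h m with
  | nil => simp
  | cons x xs ih =>
    simp only [List.foldl_cons, List.countP_cons]
    by_cases h1 : pyDictGet x "severity" == some "critical" <;>
      by_cases h2 : pyDictGet x "severity" == some "high" <;>
        by_cases h3 : pyDictGet x "severity" == some "medium" <;>
          cases cc <;> cases ch <;>
            simp_all [bTally] <;> omega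

theorem any_countP (p : List (String × String) → Bool) (xs : List (List (String × String))) :
    xs.any p = decide ((xs.countP p : Int) ≠ 0) := by
  rcases hx : xs.any p with _ | _
  · simp only [List.any_eq_false] at hx
    have : xs.countP p = 0 := List.countP_eq_zero.mpr hx
    simp [this]
  · simp only [List.any_eq_true] at hx
    have : 0 < xs.countP p := List.countP_pos_iff.mpr hx
    simp; omega

theorem filterlen_countP (p : List (String × String) → Bool) (xs : List (List (String × String))) :
    (xs.filter p).length = xs.countP p := List.countP_eq_length_filter.symm

-- ===== VERDICT =====
set_option maxHeartbeats 1000000 in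
theorem determine_review_priority_py_spec : Claim_equal_determine_review_priority_py := by
  intro sec qual comp bugs _
  unfold Spec_determine_review_priority_py determine_review_priority_py determine_review_priority_py_alt
  simp only [List.foldl_cons, List.foldl_nil, bTally_foldl, any_countP, filterlen_countP,
    decide_eq_true_eq, Bool.false_eq_true, if_true, if_false]
  set sc := (sec.countP (fun i => pyDictGet i "severity" == some "critical") : Int) with hsc
  set bc := (bugs.countP (fun i => pyDictGet i "severity" == some "critical") : Int) with hbc
  set sh := (sec.countP (fun i => pyDictGet i "severity" == some "high") : Int) with hsh
  set bh := (bugs.countP (fun i => pyDictGet i "severity" == some "high") : Int) with hbh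
  set ch := (comp.countP (fun i => pyDictGet i "severity" == some "high") : Int) with hch
  set sm := (sec.countP (fun i => pyDictGet i "severity" == some "medium") : Int) with hsm
  set qm := (qual.countP (fun i => pyDictGet i "severity" == some "medium") : Int) with hqm
  set cm := (comp.countP (fun i => pyDictGet i "severity" == some "medium") : Int) with hcm
  set bm := (bugs.countP (fun i => pyDictGet i "severity" == some "medium") : Int) with hbm
  have hsc0 : 0 ≤ sc := by positivity
  have hbc0 : 0 ≤ bc := by positivity
  have hsh0 : 0 ≤ sh := by positivity
  have hbh0 : 0 ≤ bh := by positivity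
  have hch0 : 0 ≤ ch := by positivity
  split_ifs <;> first | rfl | omega
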